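-- pv_equiv track=rewrite | github.com/AidenSabbir/Practice | string_hashing.py | prefix_hash
-- ===== SOURCE A (Python) =====
-- def prefix_hash(s,p,mod):
--     n = len(s)
--     power = 1
--     prefix = [0]*n
--     prefix[0] = ((ord(s[0])-ord('a'))+1)%mod
--     for i in range(1,n):
--         val = ord(s[i]) - ord('a') + 1
--         power = (power * p) %mod
--         prefix[i] =( prefix[i-1] + val*power)%mod
--     return prefix
-- ===== SOURCE B (Python) =====
-- def prefix_hash(s, p, mod):
--     # divide & conquer: hash the two halves independently, then splice the
--     # right half in by rescaling it with p**mid and shifting by the left total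
--     if len(s) <= 1:
--         return [(ord(s[0]) - ord('a') + 1) % mod]
--     mid = len(s) // 2
--     left = prefix_hash(s[:mid], p, mod)
--     right = prefix_hash(s[mid:], p, mod)
--     pm = pow(p, mid, mod)
--     return left + [(left[-1] + pm * r) % mod for r in right]
-- ===== Notes on version B (the rewrite author's own statement) =====
-- stated objective: alternative
-- what changed: B replaces A's single left-to-right loop with a running power by a divide-and-conquer recursion: it hashes each half of the string independently, then splices the right half's prefix hashes in by rescaling them with pow(p, mid, mod) and shifting by the left half's last hash; no running power variable or index loop exists in B.
import Mathlib
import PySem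

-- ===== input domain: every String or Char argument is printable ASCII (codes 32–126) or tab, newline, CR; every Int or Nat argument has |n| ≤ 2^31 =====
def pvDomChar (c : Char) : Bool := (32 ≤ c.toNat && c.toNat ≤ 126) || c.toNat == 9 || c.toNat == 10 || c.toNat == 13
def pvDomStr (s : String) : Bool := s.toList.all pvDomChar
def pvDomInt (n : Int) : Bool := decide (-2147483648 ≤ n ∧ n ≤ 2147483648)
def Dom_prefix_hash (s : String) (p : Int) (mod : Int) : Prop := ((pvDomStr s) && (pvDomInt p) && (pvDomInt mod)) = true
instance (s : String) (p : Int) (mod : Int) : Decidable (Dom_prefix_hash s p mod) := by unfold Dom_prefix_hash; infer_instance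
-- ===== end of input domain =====

-- B computes the prefix-hash array by divide & conquer (hash both halves, rescale the right half by p^mid and shift by the left total) instead of A's single running-power loop; equivalence proved on nonempty strings with mod ≠ 0 (elsewhere Python A raises).


-- ===== PORT A =====
-- literal port of A: one loop over range(1, n) carrying the running power and the growing prefix array
def prefix_hash (s : String) (p : Int) (mod : Int) : List Int :=
  let cs := s.toList
  let n : Int := (cs.length : Int)
  let first := PySem.Int.mod (((PySem.List.pyGetD cs 0 ' ').toNat : Int) - 97 + 1) mod
  ((PySem.List.pyRange 1 n 1).foldl
    (fun (st : Int × List Int) i =>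
      let val : Int := ((PySem.List.pyGetD cs i ' ').toNat : Int) - 97 + 1
      let power := PySem.Int.mod (st.1 * p) mod
      (power, st.2 ++ [PySem.Int.mod (st.2.getLastD 0 + val * power) mod]))
    (1, [first])).2

-- ===== PORT B =====
-- literal port of B's divide & conquer on the character list: hash both halves, then
-- splice the right half in, rescaled by pow(p, mid, mod) and shifted by left[-1]
def prefixHashDC (cs : List Char) (p m : Int) : List Int :=
  if h : cs.length ≤ 1 then
    [PySem.Int.mod (((PySem.List.pyGetD cs 0 ' ').toNat : Int) - 97 + 1) m]
  else
    let mid := cs.length / 2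
    let left := prefixHashDC (cs.take mid) p m
    let right := prefixHashDC (cs.drop mid) p m
    let pm := PySem.Int.powMod p mid m
    left ++ right.map (fun r => PySem.Int.mod (PySem.List.pyGetD left (-1) 0 + pm * r) m)
termination_by cs.length
decreasing_by
  · simp only [List.length_take]; omega
  · simp only [List.length_drop]; omega

def prefix_hash_alt (s : String) (p : Int) (mod : Int) : List Int :=
  prefixHashDC s.toList p mod

-- ===== PRECONDITION & SPEC =====
-- Pre_ excludes exactly the inputs where Python A raises: s = "" (IndexError on s[0]) and mod = 0 (ZeroDivisionError).
def Pre_prefix_hash (s : String) (p : Int) (mod : Int) : Prop := s ≠ "" ∧ mod ≠ 0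
instance (s : String) (p : Int) (mod : Int) : Decidable (Pre_prefix_hash s p mod) := by unfold Pre_prefix_hash; infer_instance
def pvWitness_prefix_hash : String × Int × Int := ("abz", 31, 1000000007)

def Spec_prefix_hash (s : String) (p : Int) (mod : Int) (out : List Int) : Prop := out = prefix_hash_alt s p mod
instance (s : String) (p : Int) (mod : Int) (out : List Int) : Decidable (Spec_prefix_hash s p mod out) := by unfold Spec_prefix_hash; infer_instance

-- ===== CLAIM (what is proved, stated in full; the proofs are below) =====
def Claim_equal_prefix_hash : Prop := ∀ (s : String) (p : Int) (mod : Int), Dom_prefix_hash s p mod → Pre_prefix_hash s p mod → Spec_prefix_hash s p mod (prefix_hash s p mod)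

-- ===== LEMMAS AND PROOFS =====

-- the j-th letter value, with the same out-of-range default both ports use
def phVal (cs : List Char) (j : Nat) : Int := ((cs.getD j ' ').toNat : Int) - 97 + 1

-- the unreduced polynomial prefix sum  Σ_{j ≤ i} val_j · p^j
def phRaw (cs : List Char) (p : Int) (i : Nat) : Int :=
  ∑ j ∈ Finset.range (i + 1), phVal cs j * p ^ j

-- the common mathematical form both ports are reduced to
def phSpec (cs : List Char) (p m : Int) : List Int :=
  (List.range cs.length).map (fun i => (phRaw cs p i).fmod m)

lemma fmod_comb1 (a b c m : Int) :
    (a.fmod m + b * c.fmod m).fmod m = (a + b * c).fmod m := by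
  calc (a.fmod m + b * c.fmod m).fmod m
      = ((a.fmod m).fmod m + (b * c.fmod m).fmod m).fmod m := by rw [← Int.add_fmod]
    _ = (a.fmod m + (b * c).fmod m).fmod m := by
        rw [Int.fmod_fmod_of_dvd _ dvd_rfl, Int.mul_fmod b (c.fmod m),
            Int.fmod_fmod_of_dvd _ dvd_rfl, ← Int.mul_fmod]
    _ = (a + b * c).fmod m := by rw [← Int.add_fmod]

lemma fmod_comb2 (a b c m : Int) :
    (a.fmod m + b.fmod m * c.fmod m).fmod m = (a + b * c).fmod m := by
  calc (a.fmod m + b.fmod m * c.fmod m).fmod m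
      = ((a.fmod m).fmod m + (b.fmod m * c.fmod m).fmod m).fmod m := by rw [← Int.add_fmod]
    _ = (a.fmod m + (b * c).fmod m).fmod m := by
        rw [Int.fmod_fmod_of_dvd _ dvd_rfl, ← Int.mul_fmod]
    _ = (a + b * c).fmod m := by rw [← Int.add_fmod]

lemma getLastD_map_range {f : Nat → Int} (n : Nat) (d : Int) :
    ((List.range (n + 1)).map f).getLastD d = f n := by
  rw [List.range_succ, List.map_append]; simp

lemma pyGetD_neg_one_map_range {f : Nat → Int} (n : Nat) (d : Int) :
    PySem.List.pyGetD ((List.range (n + 1)).map f) (-1) d = f n := by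
  rw [List.range_succ, List.map_append, List.map_cons, List.map_nil,
      PySem.List.pyGetD_neg_one_append_singleton]

lemma phVal_take (cs : List Char) (mid j : Nat) (h : j < mid) :
    phVal (cs.take mid) j = phVal cs j := by
  unfold phVal
  rw [List.getD, List.getD, List.getElem?_take_of_lt h]

lemma phVal_drop (cs : List Char) (mid j : Nat) :
    phVal (cs.drop mid) j = phVal cs (mid + j) := by
  unfold phVal
  rw [List.getD, List.getD, List.getElem?_drop]

lemma phRaw_take (cs : List Char) (p : Int) (mid i : Nat) (h : i < mid) :
    phRaw (cs.take mid) p i = phRaw cs p i := by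
  unfold phRaw
  exact Finset.sum_congr rfl (fun j hj => by
    rw [phVal_take cs mid j (by simpa using Nat.lt_of_lt_of_le (Finset.mem_range.mp hj) h)])

lemma phRaw_split (cs : List Char) (p : Int) (mid j : Nat) (h : 1 ≤ mid) :
    phRaw cs p (mid + j) = phRaw cs p (mid - 1) + p ^ mid * phRaw (cs.drop mid) p j := by
  unfold phRaw
  have h1 : mid + j + 1 = (mid - 1 + 1) + (j + 1) := by omega
  rw [h1, Finset.sum_range_add]
  congr 1
  rw [Finset.mul_sum]
  refine Finset.sum_congr rfl (fun u _ => ?_)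
  have h2 : mid - 1 + 1 = mid := by omega
  rw [h2, phVal_drop, pow_add]
  ring

-- the loop invariant of A's fold: after indices 1..k the running power is p^k reduced
-- (unreduced 1 before the first step) and the list is the first k+1 spec entries
lemma prefix_hash_loop (cs : List Char) (p m : Int) : ∀ k : Nat,
    ((PySem.List.pyRange 1 (1 + (k : Int)) 1).foldl
      (fun (st : Int × List Int) i =>
        (PySem.Int.mod (st.1 * p) m,
         st.2 ++ [PySem.Int.mod (st.2.getLastD 0 +
           (((PySem.List.pyGetD cs i ' ').toNat : Int) - 97 + 1) * PySem.Int.mod (st.1 * p) m) m]))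
      (1, [PySem.Int.mod (((PySem.List.pyGetD cs 0 ' ').toNat : Int) - 97 + 1) m]))
    = ((if k = 0 then 1 else (p ^ k).fmod m),
       (List.range (k + 1)).map (fun i => (phRaw cs p i).fmod m)) := by
  intro k
  induction k with
  | zero =>
    rw [PySem.List.pyRange_one_eq_nil (by omega)]
    simp [phRaw, phVal, PySem.Int.mod, PySem.List.pyGetD_zero, List.getD]
  | succ k ih =>
    have hsplit : (1 : Int) + ((k + 1 : Nat) : Int) = (1 + (k : Int)) + 1 := by push_cast; ring
    rw [hsplit, PySem.List.pyRange_one_succ_right (by omega), List.foldl_append, ih]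
    have htoNat : ((1 + (k : Int))).toNat = k + 1 := by omega
    simp only [List.foldl_cons, List.foldl_nil, PySem.Int.mod]
    have hpow : ((if k = 0 then (1 : Int) else (p ^ k).fmod m) * p).fmod m = (p ^ (k + 1)).fmod m := by
      by_cases hk : k = 0
      · simp [hk]
      · rw [if_neg hk, pow_succ, Int.mul_fmod (p ^ k) p, Int.mul_fmod ((p ^ k).fmod m) p,
            Int.fmod_fmod_of_dvd _ dvd_rfl]
    rw [hpow]
    refine Prod.ext (by simp) ?_
    simp only
    rw [getLastD_map_range]
    have hval : ((PySem.List.pyGetD cs (1 + (k : Int)) ' ').toNat : Int) - 97 + 1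
        = phVal cs (k + 1) := by
      have : (1 + (k : Int)) = ((k + 1 : Nat) : Int) := by push_cast; ring
      rw [this, PySem.List.pyGetD_natCast]; rfl
    rw [hval, fmod_comb1]
    have hraw : phRaw cs p k + phVal cs (k + 1) * p ^ (k + 1) = phRaw cs p (k + 1) := by
      unfold phRaw
      conv_rhs => rw [Finset.sum_range_succ]
    rw [hraw]
    simp [List.range_succ]

-- A's port equals the spec list on nonempty strings
lemma prefix_hash_eq_spec (cs : List Char) (p m : Int) (h : 1 ≤ cs.length) :
    ((PySem.List.pyRange 1 (cs.length : Int) 1).foldl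
      (fun (st : Int × List Int) i =>
        (PySem.Int.mod (st.1 * p) m,
         st.2 ++ [PySem.Int.mod (st.2.getLastD 0 +
           (((PySem.List.pyGetD cs i ' ').toNat : Int) - 97 + 1) * PySem.Int.mod (st.1 * p) m) m]))
      (1, [PySem.Int.mod (((PySem.List.pyGetD cs 0 ' ').toNat : Int) - 97 + 1) m])).2
    = phSpec cs p m := by
  obtain ⟨l, hl⟩ : ∃ l, cs.length = l + 1 := ⟨cs.length - 1, by omega⟩
  have : (cs.length : Int) = 1 + (l : Int) := by rw [hl]; push_cast; ring
  rw [this, prefix_hash_loop]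
  unfold phSpec
  rw [hl]

-- B's divide & conquer equals the spec list on nonempty strings
lemma prefixHashDC_eq_spec (p m : Int) : ∀ (n : Nat) (cs : List Char),
    cs.length = n → 1 ≤ n → prefixHashDC cs p m = phSpec cs p m := by
  intro n
  induction n using Nat.strong_induction_on with
  | _ n ih =>
    intro cs hlen hpos
    rw [prefixHashDC]
    by_cases h1 : cs.length ≤ 1
    · rw [dif_pos h1]
      have : cs.length = 1 := by omega
      unfold phSpec
      rw [this, List.range_one, List.map_cons, List.map_nil]
      simp [phRaw, phVal, PySem.Int.mod, PySem.List.pyGetD_zero]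
    · rw [dif_neg h1]
      simp only
      set mid := cs.length / 2 with hmid
      have hm1 : 1 ≤ mid := by omega
      have hm2 : mid < cs.length := by omega
      have hLlen : (cs.take mid).length = mid := by simp; omega
      have hRlen : (cs.drop mid).length = cs.length - mid := by simp
      rw [ih mid (by omega) _ hLlen hm1,
          ih (cs.length - mid) (by omega) _ hRlen (by omega)]
      unfold phSpec
      rw [hLlen, hRlen]
      obtain ⟨l, hl⟩ : ∃ l, mid = l + 1 := ⟨mid - 1, by omega⟩
      have hlast : PySem.List.pyGetD ((List.range mid).map
          (fun i => (phRaw (cs.take mid) p i).fmod m)) (-1) 0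
          = (phRaw cs p (mid - 1)).fmod m := by
        rw [hl, pyGetD_neg_one_map_range, phRaw_take cs p (l + 1) l (by omega)]
        congr 2
      rw [hlast, List.map_map]
      have hsplitlen : cs.length = mid + (cs.length - mid) := by omega
      conv_rhs => rw [hsplitlen, List.range_add, List.map_append, List.map_map]
      congr 1
      · exact List.map_congr_left (fun i hi =>
          by rw [phRaw_take cs p mid i (List.mem_range.mp hi)])
      · refine List.map_congr_left (fun j _ => ?_)
        simp only [Function.comp_apply, PySem.Int.powMod, PySem.Int.mod]
        rw [fmod_comb2, ← phRaw_split cs p mid j hm1]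

-- ===== VERDICT (by name: the statement is the Claim_ definition above) =====
theorem prefix_hash_spec : Claim_equal_prefix_hash := by
  intro s p m _ hpre
  unfold Spec_prefix_hash prefix_hash prefix_hash_alt
  have hne : s.toList ≠ [] := by
    intro h
    exact hpre.1 (String.toList_eq_nil_iff.mp h)
  have hlen : 1 ≤ s.toList.length := List.length_pos_iff.mpr hne
  rw [prefix_hash_eq_spec s.toList p m hlen, prefixHashDC_eq_spec p m s.toList.length s.toList rfl hlen]
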